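-- pv_equiv track=rewrite | github.com/osvald-go2/gaia_ai_doc_backend | nodes/understand_doc_streaming.py | _extract_grid_blocks
-- ===== SOURCE A (Python) =====
-- from typing import List, Dict, Any, Tuple, AsyncGenerator, Optional
--
-- def _extract_grid_blocks(content: str) -> List[Tuple[str, int]]:
--     """提取grid块"""
--     grid_blocks = []
--     lines = content.split('\n')
--     in_grid = False
--     grid_start = 0
--     grid_content = []
--
--     for i, line in enumerate(lines):
--         if line.strip().startswith('```grid'):
--             if not in_grid:
--                 in_grid = True
--                 grid_start = i
--                 grid_content = []
--             grid_content.append(line)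
--         elif line.strip() == '```' and in_grid:
--             grid_content.append(line)
--             grid_blocks.append(('\n'.join(grid_content), grid_start))
--             in_grid = False
--         elif in_grid:
--             grid_content.append(line)
--
--     return grid_blocks
-- ===== SOURCE B (Python) =====
-- def _extract_grid_blocks(content: str):
--     """Staged passes: collect fence-line indices first, then match open/close pairs
--     with two pointers over those index lists, then slice each block out of lines."""
--     lines = content.split('\n')
--     opens = [i for i, l in enumerate(lines) if l.strip().startswith('```grid')]
--     closes = [i for i, l in enumerate(lines) if l.strip() == '```']
--     blocks = []
--     pos = 0
--     ci = 0
--     for o in opens: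
--         if o < pos:
--             continue
--         while ci < len(closes) and closes[ci] <= o:
--             ci += 1
--         if ci == len(closes):
--             break
--         c = closes[ci]
--         blocks.append(('\n'.join(lines[o:c + 1]), o))
--         pos = c + 1
--     return blocks
-- ===== Notes on version B (the rewrite author's own statement) =====
-- stated objective: alternative
-- what changed: Replaces A's single stateful scan (in_grid flag, block accumulator built line by line) by staged passes: first collect the indices of all opening and closing fence lines, then match them with two pointers (first close after each admissible open), and finally obtain each block by slicing lines[o:c+1] and joining.
import Mathlib
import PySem

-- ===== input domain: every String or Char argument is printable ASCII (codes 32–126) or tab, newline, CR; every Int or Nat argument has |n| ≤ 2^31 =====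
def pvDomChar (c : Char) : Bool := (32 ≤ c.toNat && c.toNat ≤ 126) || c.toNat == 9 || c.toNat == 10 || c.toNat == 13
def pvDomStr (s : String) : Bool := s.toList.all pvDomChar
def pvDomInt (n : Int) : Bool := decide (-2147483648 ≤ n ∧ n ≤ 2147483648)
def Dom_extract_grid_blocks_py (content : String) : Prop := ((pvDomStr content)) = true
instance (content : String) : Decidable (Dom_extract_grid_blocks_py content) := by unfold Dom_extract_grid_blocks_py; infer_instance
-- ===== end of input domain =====

-- B replaces A's single stateful scan (in_grid flag, block built line by line) by staged passes:
-- collect fence-line indices, match them with two pointers, slice each block out; same return value,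
-- no speed claim (both are linear).

-- line classifiers shared by both ports (each is exactly the Python test on that line)
def pvIsOpen (l : String) : Bool := PySem.Str.startswith (PySem.Str.strip l) "```grid"
def pvIsClose (l : String) : Bool := PySem.Str.strip l == "```"

-- ===== PORT A =====
-- loop body of A's single for-loop: state = (grid_blocks, in_grid, grid_start, grid_content)
def pvStepA (s : List (String × Int) × Bool × Int × List String) (p : Int × String) :
    List (String × Int) × Bool × Int × List String :=
  match s, p with
  | (grid_blocks, in_grid, grid_start, grid_content), (i, line) =>
    if pvIsOpen line then
      if in_grid then (grid_blocks, in_grid, grid_start, grid_content ++ [line])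
      else (grid_blocks, true, i, [line])
    else if pvIsClose line && in_grid then
      (grid_blocks ++ [(PySem.Str.join "\n" (grid_content ++ [line]), grid_start)],
        false, grid_start, grid_content ++ [line])
    else if in_grid then (grid_blocks, in_grid, grid_start, grid_content ++ [line])
    else (grid_blocks, in_grid, grid_start, grid_content)

def extract_grid_blocks_py (content : String) : List (String × Int) :=
  -- split? is none only for sep = ""; here sep is "\n", so getD [] never fires
  let lines := (PySem.Str.split? content "\n").getD []
  ((PySem.List.enumerate lines 0).foldl pvStepA ([], false, 0, [])).1

-- ===== PORT B =====
-- the `while ci < len(closes) and closes[ci] <= o: ci += 1` pointer advance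
def pvDropLE (o : Int) : List Int → List Int
  | [] => []
  | c :: cs => if c ≤ o then pvDropLE o cs else c :: cs

-- B's `for o in opens` loop: two-pointer matching plus slicing
def pvMatchB (lines : List String) : List Int → List Int → Int → List (String × Int) → List (String × Int)
  | [], _, _, blocks => blocks
  | o :: os, closes, pos, blocks =>
    if o < pos then pvMatchB lines os closes pos blocks
    else
      match pvDropLE o closes with
      | [] => blocks
      | c :: cs =>
          pvMatchB lines os (c :: cs) (c + 1)
            (blocks ++ [(PySem.Str.join "\n" (PySem.List.slice lines (some o) (some (c + 1))), o)])

def extract_grid_blocks_py_alt (content : String) : List (String × Int) :=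
  let lines := (PySem.Str.split? content "\n").getD []
  let opens := (PySem.List.enumerate lines 0).filterMap (fun p => if pvIsOpen p.2 then some p.1 else none)
  let closes := (PySem.List.enumerate lines 0).filterMap (fun p => if pvIsClose p.2 then some p.1 else none)
  pvMatchB lines opens closes 0 []

-- ===== PRECONDITION & SPEC =====
def Spec_extract_grid_blocks_py (content : String) (out : List (String × Int)) : Prop := out = extract_grid_blocks_py_alt content
instance (content : String) (out : List (String × Int)) : Decidable (Spec_extract_grid_blocks_py content out) := by unfold Spec_extract_grid_blocks_py; infer_instance

-- ===== CLAIM (what is proved, stated in full; the proofs are below) =====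
def Claim_equal_extract_grid_blocks_py : Prop := ∀ (content : String), Dom_extract_grid_blocks_py content → Spec_extract_grid_blocks_py content (extract_grid_blocks_py content)

-- ===== LEMMAS AND PROOFS =====

-- Proof-side bridge: a direct recursive reformulation of A's loop (an outer scan that, at an
-- opening fence, consumes lines to the close with pvInnerB).  A's fold is first shown equal to
-- this bridge, which is then shown equal to B's staged matching.
def pvInnerB : List String → Option (List String × Nat)
  | [] => none
  | l :: rest =>
    if pvIsClose l then some ([l], 1)
    else
      match pvInnerB rest with
      | none => none
      | some (buf, k) => some (l :: buf, k + 1)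

def pvOuterB : List String → Int → List (String × Int) → List (String × Int)
  | [], _, blocks => blocks
  | l :: rest, i, blocks =>
    if pvIsOpen l then
      match pvInnerB rest with
      | none => blocks
      | some (buf, k) =>
          pvOuterB (rest.drop k) (i + 1 + k) (blocks ++ [(PySem.Str.join "\n" (l :: buf), i)])
    else pvOuterB rest (i + 1) blocks
termination_by lines => lines.length
decreasing_by
  all_goals simp [List.length_drop]

-- an opener line is never a bare closing fence
theorem pv_opener_not_close (l : String) (h : pvIsOpen l = true) : pvIsClose l = false := by
  unfold pvIsOpen at h
  unfold pvIsClose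
  by_contra hne
  have hc : PySem.Str.strip l = "```" := by
    cases hb : (PySem.Str.strip l == "```") with
    | false => exact absurd hb hne
    | true => exact eq_of_beq hb
  rw [hc] at h
  exact absurd h (by decide)

-- A's fold from an out-of-grid state is pvOuterB; from an in-grid state it is pvInnerB then pvOuterB
theorem pv_loop_lemma (lines : List String) :
    (∀ (i : Int) (blocks : List (String × Int)) (gs : Int) (gc : List String),
      ((PySem.List.enumerate lines i).foldl pvStepA (blocks, false, gs, gc)).1
        = pvOuterB lines i blocks) ∧
    (∀ (i start : Int) (buf : List String) (blocks : List (String × Int)),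
      ((PySem.List.enumerate lines i).foldl pvStepA (blocks, true, start, buf)).1
        = match pvInnerB lines with
          | none => blocks
          | some (tail, k) =>
              pvOuterB (lines.drop k) (i + k)
                (blocks ++ [(PySem.Str.join "\n" (buf ++ tail), start)])) := by
  induction lines with
  | nil =>
      constructor
      · intro i blocks gs gc; simp [PySem.List.enumerate, pvOuterB]
      · intro i start buf blocks; simp [PySem.List.enumerate, pvInnerB]
  | cons l rest ih =>
      obtain ⟨ihOut, ihIn⟩ := ih
      constructor
      · intro i blocks gs gc
        rw [PySem.List.enumerate_cons, List.foldl_cons]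
        by_cases hgrid : pvIsOpen l = true
        · simp only [pvStepA, hgrid, if_true, Bool.false_eq_true, if_false]
          rw [ihIn (i + 1) i [l] blocks]
          simp only [pvOuterB, hgrid, if_true]
          cases hinn : pvInnerB rest with
          | none => rfl
          | some p =>
              obtain ⟨tail, k⟩ := p
              simp only [List.singleton_append]
        · simp only [pvStepA, hgrid, if_false, Bool.and_false, Bool.false_eq_true, if_false]
          rw [ihOut (i + 1) blocks gs gc]
          have hgridF : pvIsOpen l = false := Bool.not_eq_true _ ▸ hgrid
          simp only [pvOuterB, hgridF, Bool.false_eq_true, if_false]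
      · intro i start buf blocks
        rw [PySem.List.enumerate_cons, List.foldl_cons]
        by_cases hgrid : pvIsOpen l = true
        · -- opener line while in grid: appended, block stays open
          have hnc := pv_opener_not_close l hgrid
          simp only [pvStepA, hgrid, if_true]
          rw [ihIn (i + 1) start (buf ++ [l]) blocks]
          simp only [pvInnerB, hnc, Bool.false_eq_true, if_false]
          cases hinn : pvInnerB rest with
          | none => rfl
          | some p =>
              obtain ⟨tail, k⟩ := p
              simp only [List.drop_succ_cons, List.append_assoc, List.singleton_append]
              congr 1
              omega
        · by_cases hclose : pvIsClose l = true
          · -- closing fence: block is emitted, grid mode ends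
            simp only [pvStepA, hgrid, Bool.false_eq_true, if_false, hclose, Bool.true_and,
              if_true]
            rw [ihOut (i + 1) (blocks ++ [(PySem.Str.join "\n" (buf ++ [l]), start)]) start
              (buf ++ [l])]
            simp only [pvInnerB, hclose, if_true, List.drop_succ_cons, List.drop_zero,
              Nat.cast_one]
          · -- ordinary line inside the block
            simp only [pvStepA, hgrid, Bool.false_eq_true, if_false, hclose, Bool.false_and,
              if_true]
            rw [ihIn (i + 1) start (buf ++ [l]) blocks]
            simp only [pvInnerB, hclose, Bool.false_eq_true, if_false]
            cases hinn : pvInnerB rest with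
            | none => rfl
            | some p =>
                obtain ⟨tail, k⟩ := p
                simp only [List.drop_succ_cons, List.append_assoc, List.singleton_append]
                congr 1
                omega

-- indices of the lines satisfying f, starting at index i (what B's comprehensions compute)
def pvIdxs (f : String → Bool) : List String → Int → List Int
  | [], _ => []
  | l :: r, i => if f l then i :: pvIdxs f r (i + 1) else pvIdxs f r (i + 1)

theorem pvIdxs_eq_filterMap (f : String → Bool) (r : List String) : ∀ i : Int,
    (PySem.List.enumerate r i).filterMap (fun p => if f p.2 then some p.1 else none)
      = pvIdxs f r i := by
  induction r with
  | nil => intro i; simp [PySem.List.enumerate, pvIdxs]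
  | cons l r ih =>
      intro i
      rw [PySem.List.enumerate_cons, List.filterMap_cons]
      by_cases h : f l = true
      · simp only [h, if_true, pvIdxs, ih]
      · have h' : f l = false := Bool.not_eq_true _ ▸ h
        simp only [h', Bool.false_eq_true, if_false, pvIdxs, ih]

theorem pvIdxs_bounds (f : String → Bool) (r : List String) : ∀ (i : Int) (x : Int),
    x ∈ pvIdxs f r i → i ≤ x ∧ x < i + r.length := by
  induction r with
  | nil => intro i x hx; simp [pvIdxs] at hx
  | cons l r ih =>
      intro i x hx
      unfold pvIdxs at hx
      by_cases h : f l = true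
      · rw [if_pos h] at hx
        rcases List.mem_cons.1 hx with h1 | h2
        · subst h1
          refine ⟨le_refl _, ?_⟩
          simp only [List.length_cons]
          push_cast
          omega
        · have := ih (i + 1) x h2; simp at this ⊢; omega
      · rw [if_neg h] at hx
        have := ih (i + 1) x hx; simp at this ⊢; omega

theorem pvIdxs_split (f : String → Bool) (k : Nat) : ∀ (r : List String) (i : Int),
    pvIdxs f r i = pvIdxs f (r.take k) i ++ pvIdxs f (r.drop k) (i + k) := by
  induction k with
  | zero => intro r i; simp [pvIdxs]
  | succ k ih =>
      intro r i
      cases r with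
      | nil => simp [pvIdxs]
      | cons l r =>
          simp only [List.take_succ_cons, List.drop_succ_cons]
          have hidx : i + ((k + 1 : Nat) : Int) = (i + 1) + (k : Int) := by push_cast; ring
          rw [hidx]
          simp only [pvIdxs]
          by_cases h : f l = true
          · simp only [h, if_true, List.cons_append]
            rw [ih r (i + 1)]
          · simp only [h, Bool.false_eq_true, if_false]
            rw [ih r (i + 1)]

-- characterisation of pvInnerB via the close-fence index list
theorem pvInner_none (r : List String) (h : pvInnerB r = none) :
    ∀ j : Int, pvIdxs pvIsClose r j = [] := by
  induction r with
  | nil => intro j; simp [pvIdxs]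
  | cons l r ih =>
      intro j
      unfold pvInnerB at h
      by_cases hc : pvIsClose l = true
      · rw [if_pos hc] at h; exact absurd h (by simp)
      · rw [if_neg hc] at h
        unfold pvIdxs
        rw [if_neg hc]
        cases hr : pvInnerB r with
        | none => exact ih (by rw [hr]) (j + 1)
        | some p => obtain ⟨buf, k⟩ := p; rw [hr] at h; exact absurd h (by simp)

theorem pvInner_some : ∀ (r : List String) (buf : List String) (k : Nat),
    pvInnerB r = some (buf, k) →
    buf = r.take k ∧ 1 ≤ k ∧ k ≤ r.length ∧
      ∀ j : Int, pvIdxs pvIsClose r j = (j + k - 1) :: pvIdxs pvIsClose (r.drop k) (j + k) := by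
  intro r
  induction r with
  | nil => intro buf k h; exact absurd h (by simp [pvInnerB])
  | cons l r ih =>
      intro buf k h
      unfold pvInnerB at h
      by_cases hc : pvIsClose l = true
      · rw [if_pos hc] at h
        obtain ⟨hb, hk⟩ : [l] = buf ∧ 1 = k := by
          constructor <;> [exact congrArg Prod.fst (Option.some.inj h);
            exact congrArg Prod.snd (Option.some.inj h)]
        subst hb; subst hk
        refine ⟨rfl, le_refl 1, by simp, ?_⟩
        intro j
        simp only [Nat.cast_one, List.drop_succ_cons, List.drop_zero, pvIdxs, hc, if_true]
        congr 1
        omega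
      · rw [if_neg hc] at h
        cases hr : pvInnerB r with
        | none => rw [hr] at h; exact absurd h (by simp)
        | some p =>
            obtain ⟨buf', k'⟩ := p
            rw [hr] at h
            obtain ⟨hb, hk⟩ : l :: buf' = buf ∧ k' + 1 = k := by
              constructor <;> [exact congrArg Prod.fst (Option.some.inj h);
                exact congrArg Prod.snd (Option.some.inj h)]
            subst hb; subst hk
            obtain ⟨hbuf, hk1, hkl, hcl⟩ := ih buf' k' hr
            refine ⟨by rw [List.take_succ_cons, hbuf], by omega, by simp; omega, ?_⟩
            intro j
            have hidx : j + ((k' + 1 : Nat) : Int) = (j + 1) + (k' : Int) := by push_cast; ring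
            have hcF : pvIsClose l = false := Bool.not_eq_true _ ▸ hc
            rw [hidx]
            simp only [pvIdxs, hcF, Bool.false_eq_true, if_false, List.drop_succ_cons]
            rw [hcl (j + 1)]

-- pvDropLE drops a stale prefix (elements ≤ o) and leaves a list whose head exceeds o
theorem pvDropLE_append (o : Int) : ∀ (xs ys : List Int), (∀ x ∈ xs, x ≤ o) →
    pvDropLE o (xs ++ ys) = pvDropLE o ys := by
  intro xs
  induction xs with
  | nil => intro ys _; simp
  | cons x xs ih =>
      intro ys hx
      simp only [List.cons_append, pvDropLE]
      rw [if_pos (hx x (List.mem_cons_self))]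
      exact ih ys (fun y hy => hx y (List.mem_cons_of_mem _ hy))

theorem pvDropLE_of_gt (o : Int) : ∀ (cs : List Int), (∀ x ∈ cs, o < x) →
    pvDropLE o cs = cs := by
  intro cs hcs
  cases cs with
  | nil => rfl
  | cons c cs =>
      unfold pvDropLE
      rw [if_neg (by have := hcs c List.mem_cons_self; omega)]

-- pvMatchB ignores opens below pos
theorem pvMatchB_skip (lines : List String) : ∀ (xs ys closes : List Int) (pos : Int)
    (blocks : List (String × Int)), (∀ x ∈ xs, x < pos) →
    pvMatchB lines (xs ++ ys) closes pos blocks = pvMatchB lines ys closes pos blocks := by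
  intro xs
  induction xs with
  | nil => intro ys closes pos blocks _; simp
  | cons x xs ih =>
      intro ys closes pos blocks hx
      simp only [List.cons_append, pvMatchB]
      rw [if_pos (hx x List.mem_cons_self)]
      exact ih ys closes pos blocks (fun y hy => hx y (List.mem_cons_of_mem _ hy))

-- pvMatchB does not depend on pos when every open is at least both candidates
theorem pvMatchB_pos_irrel (lines : List String) (opens closes : List Int)
    (pos1 pos2 : Int) (blocks : List (String × Int))
    (h : ∀ o ∈ opens, pos1 ≤ o ∧ pos2 ≤ o) :
    pvMatchB lines opens closes pos1 blocks = pvMatchB lines opens closes pos2 blocks := by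
  cases opens with
  | nil => rfl
  | cons o os =>
      have ho := h o List.mem_cons_self
      simp only [pvMatchB]
      rw [if_neg (by omega), if_neg (by omega)]

-- main simulation: pvOuterB over the suffix of lines at index m equals B's staged matcher
set_option maxHeartbeats 1000000 in
theorem pv_main : ∀ (n : Nat) (rest : List String), rest.length ≤ n →
    ∀ (lines : List String) (m : Nat) (blocks : List (String × Int)) (staleC : List Int),
    lines.drop m = rest → (∀ x ∈ staleC, x < (m : Int)) →
    pvOuterB rest (m : Int) blocks
      = pvMatchB lines (pvIdxs pvIsOpen rest (m : Int))
          (staleC ++ pvIdxs pvIsClose rest (m : Int)) (m : Int) blocks := by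
  intro n
  induction n with
  | zero =>
      intro rest hlen lines m blocks staleC hdrop hstale
      have : rest = [] := List.eq_nil_of_length_eq_zero (Nat.le_zero.1 hlen)
      subst this
      simp [pvOuterB, pvIdxs, pvMatchB]
  | succ n ih =>
      intro rest hlen lines m blocks staleC hdrop hstale
      cases rest with
      | nil => simp [pvOuterB, pvIdxs, pvMatchB]
      | cons l r =>
          by_cases hop : pvIsOpen l = true
          · -- opening fence at index m
            have hnc : pvIsClose l = false := pv_opener_not_close l hop
            -- LHS
            simp only [pvOuterB, hop, if_true]
            -- RHS index lists
            have hopens : pvIdxs pvIsOpen (l :: r) (m : Int) = (m : Int) :: pvIdxs pvIsOpen r ((m : Int) + 1) := by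
              simp only [pvIdxs, hop, if_true]
            have hcloses : pvIdxs pvIsClose (l :: r) (m : Int) = pvIdxs pvIsClose r ((m : Int) + 1) := by
              simp only [pvIdxs, hnc, Bool.false_eq_true, if_false]
            rw [hopens, hcloses]
            -- B's step on open o = m
            simp only [pvMatchB]
            rw [if_neg (by omega)]
            -- drop stale closes
            have hdropstale : pvDropLE (m : Int) (staleC ++ pvIdxs pvIsClose r ((m : Int) + 1))
                = pvDropLE (m : Int) (pvIdxs pvIsClose r ((m : Int) + 1)) :=
              pvDropLE_append (m : Int) staleC _ (fun x hx => le_of_lt (hstale x hx))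
            cases hinn : pvInnerB r with
            | none =>
                rw [hdropstale, pvInner_none r hinn ((m : Int) + 1)]
                rfl
            | some p =>
                obtain ⟨buf, k⟩ := p
                obtain ⟨hbuf, hk1, hkl, hcl⟩ := pvInner_some r buf k hinn
                have hclr := hcl ((m : Int) + 1)
                have hhead : ((m : Int) + 1 + (k : Int) - 1) = (m : Int) + (k : Int) := by ring
                rw [hdropstale, hclr, hhead]
                have hgt : pvDropLE (m : Int) (((m : Int) + (k : Int)) :: pvIdxs pvIsClose (r.drop k) ((m : Int) + 1 + (k : Int)))
                    = ((m : Int) + (k : Int)) :: pvIdxs pvIsClose (r.drop k) ((m : Int) + 1 + (k : Int)) := by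
                  apply pvDropLE_of_gt
                  intro x hx
                  rcases List.mem_cons.1 hx with h1 | h2
                  · omega
                  · have := (pvIdxs_bounds pvIsClose (r.drop k) ((m : Int) + 1 + (k : Int)) x h2).1
                    omega
                rw [hgt]
                dsimp only
                -- the emitted slice is the block's lines
                have hslice : PySem.List.slice lines (some (m : Int)) (some ((m : Int) + (k : Int) + 1))
                    = l :: buf := by
                  have : ((m : Int) + (k : Int) + 1) = ((m : Int) + ((k + 1 : Nat) : Int)) := by push_cast; ring
                  rw [this, PySem.List.slice_natCast_add, hdrop, hbuf]
                  simp [List.take_succ_cons]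
                rw [hslice]
                -- split remaining opens at the block boundary and skip the in-block ones
                have hsplit := pvIdxs_split pvIsOpen k r ((m : Int) + 1)
                rw [hsplit]
                have hskip : pvMatchB lines
                    (pvIdxs pvIsOpen (r.take k) ((m : Int) + 1) ++ pvIdxs pvIsOpen (r.drop k) ((m : Int) + 1 + (k : Int)))
                    (((m : Int) + (k : Int)) :: pvIdxs pvIsClose (r.drop k) ((m : Int) + 1 + (k : Int)))
                    ((m : Int) + (k : Int) + 1)
                    (blocks ++ [(PySem.Str.join "\n" (l :: buf), (m : Int))])
                    = pvMatchB lines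
                    (pvIdxs pvIsOpen (r.drop k) ((m : Int) + 1 + (k : Int)))
                    (((m : Int) + (k : Int)) :: pvIdxs pvIsClose (r.drop k) ((m : Int) + 1 + (k : Int)))
                    ((m : Int) + (k : Int) + 1)
                    (blocks ++ [(PySem.Str.join "\n" (l :: buf), (m : Int))]) := by
                  apply pvMatchB_skip
                  intro x hx
                  have hb := pvIdxs_bounds pvIsOpen (r.take k) ((m : Int) + 1) x hx
                  have hlen' : (r.take k).length ≤ k := by simp
                  have := hb.2
                  have : x < (m : Int) + 1 + (r.take k).length := this
                  have hcast : ((r.take k).length : Int) ≤ (k : Int) := by exact_mod_cast hlen'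
                  omega
                rw [hskip]
                -- apply the induction hypothesis at index m + 1 + k with one stale close
                have hidx : ((m : Int) + 1 + (k : Int)) = (((m + 1 + k : Nat) : Int)) := by push_cast; ring
                have hidx2 : ((m : Int) + (k : Int) + 1) = (((m + 1 + k : Nat) : Int)) := by push_cast; ring
                have hdrop' : lines.drop (m + 1 + k) = r.drop k := by
                  have : m + 1 + k = (m + 1) + k := rfl
                  rw [this, ← List.drop_drop, ← List.drop_drop]
                  rw [show lines.drop m = l :: r from hdrop]
                  simp
                have hih := ih (r.drop k)
                  (by simp only [List.length_drop]; simp only [List.length_cons] at hlen; omega)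
                  lines (m + 1 + k)
                  (blocks ++ [(PySem.Str.join "\n" (l :: buf), (m : Int))])
                  [(m : Int) + (k : Int)] hdrop'
                  (by intro x hx; simp at hx; subst hx; push_cast; omega)
                rw [hidx, hidx2, hih]
                simp only [List.singleton_append]
          · -- not an opening fence
            have hopF : pvIsOpen l = false := Bool.not_eq_true _ ▸ hop
            simp only [pvOuterB, hopF, Bool.false_eq_true, if_false]
            have hopens : pvIdxs pvIsOpen (l :: r) (m : Int) = pvIdxs pvIsOpen r ((m : Int) + 1) := by
              simp only [pvIdxs, hopF, Bool.false_eq_true, if_false]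
            rw [hopens]
            have hdrop' : lines.drop (m + 1) = r := by
              rw [← List.drop_drop, show lines.drop m = l :: r from hdrop]; simp
            have hm1 : ((m : Int) + 1) = (((m + 1 : Nat) : Int)) := by push_cast; ring
            by_cases hc : pvIsClose l = true
            · have hcloses : pvIdxs pvIsClose (l :: r) (m : Int) = (m : Int) :: pvIdxs pvIsClose r ((m : Int) + 1) := by
                simp only [pvIdxs, hc, if_true]
              rw [hcloses]
              have hih := ih r (by simp at hlen; omega) lines (m + 1) blocks
                (staleC ++ [(m : Int)]) hdrop'
                (by intro x hx; rcases List.mem_append.1 hx with h1 | h2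
                    · have := hstale x h1; push_cast; omega
                    · simp at h2; subst h2; push_cast; omega)
              rw [hm1, hih]
              have hirrel := pvMatchB_pos_irrel lines (pvIdxs pvIsOpen r (((m + 1 : Nat) : Int)))
                ((staleC ++ [(m : Int)]) ++ pvIdxs pvIsClose r (((m + 1 : Nat) : Int)))
                (((m + 1 : Nat) : Int)) ((m : Nat) : Int) blocks
                (by intro o ho
                    have := (pvIdxs_bounds pvIsOpen r (((m + 1 : Nat) : Int)) o ho).1
                    push_cast at this ⊢; omega)
              rw [hirrel, ← hm1]
              simp only [List.append_assoc, List.singleton_append]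
            · have hcF : pvIsClose l = false := Bool.not_eq_true _ ▸ hc
              have hcloses : pvIdxs pvIsClose (l :: r) (m : Int) = pvIdxs pvIsClose r ((m : Int) + 1) := by
                simp only [pvIdxs, hcF, Bool.false_eq_true, if_false]
              rw [hcloses]
              have hih := ih r (by simp at hlen; omega) lines (m + 1) blocks staleC hdrop'
                (by intro x hx; have := hstale x hx; push_cast; omega)
              rw [hm1, hih]
              have hirrel := pvMatchB_pos_irrel lines (pvIdxs pvIsOpen r (((m + 1 : Nat) : Int)))
                (staleC ++ pvIdxs pvIsClose r (((m + 1 : Nat) : Int)))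
                (((m + 1 : Nat) : Int)) ((m : Nat) : Int) blocks
                (by intro o ho
                    have := (pvIdxs_bounds pvIsOpen r (((m + 1 : Nat) : Int)) o ho).1
                    push_cast at this ⊢; omega)
              rw [hirrel, ← hm1]

-- the whole program on any line list: A's fold equals B's staged matcher
theorem pv_total (lines : List String) :
    ((PySem.List.enumerate lines 0).foldl pvStepA ([], false, 0, [])).1
      = pvMatchB lines
          ((PySem.List.enumerate lines 0).filterMap (fun p => if pvIsOpen p.2 then some p.1 else none))
          ((PySem.List.enumerate lines 0).filterMap (fun p => if pvIsClose p.2 then some p.1 else none))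
          0 [] := by
  rw [(pv_loop_lemma lines).1 0 [] 0 []]
  rw [pvIdxs_eq_filterMap pvIsOpen lines 0, pvIdxs_eq_filterMap pvIsClose lines 0]
  have h0 := pv_main lines.length lines (le_refl _) lines 0 [] [] (by simp) (by intro x hx; simp at hx)
  simp only [Nat.cast_zero, List.nil_append] at h0
  exact h0

-- ===== VERDICT (by name: the statement is the Claim_ definition above) =====
theorem extract_grid_blocks_py_spec : Claim_equal_extract_grid_blocks_py := by
  intro content _
  exact pv_total ((PySem.Str.split? content "\n").getD [])
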